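-- pv_equiv track=rewrite | github.com/jagdevsinghdosanjh/CEP_OMR | cep_baseline_omr/core/grid_mapper.py | generate_question_grid
-- ===== SOURCE A (Python) =====
-- def generate_question_grid(start_x, start_y, dx, dy, rows, cols):
--     """
--     Generates a grid of question bubble centers.
--     Returns a dictionary: {question_number: [(x1, y1), (x2, y2), ...]}
--     """
--     grid = {}
--     q_num = 1
--
--     for r in range(rows):
--         for c in range(cols):
--             x = start_x + c * dx
--             y = start_y + r * dy
--             grid[q_num] = grid.get(q_num, []) + [(x, y)]
--             if len(grid[q_num]) == 4:
--                 q_num += 1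
--
--     return grid
-- ===== SOURCE B (Python) =====
-- def generate_question_grid(start_x, start_y, dx, dy, rows, cols):
--     """
--     Generates a grid of question bubble centers.
--     Returns a dictionary: {question_number: [(x1, y1), (x2, y2), ...]}
--     """
--     centers = [(start_x + c * dx, start_y + r * dy)
--                for r in range(rows) for c in range(cols)]
--     return {q + 1: centers[4 * q: 4 * q + 4]
--             for q in range((len(centers) + 3) // 4)}
-- ===== Notes on version B (the rewrite author's own statement) =====
-- stated objective: simpler
-- what changed: Replaces A's single pass that mutates a dict per cell with a stateful q_num counter (bumped whenever a question's list reaches length 4) by a two-stage pipeline: first materialize the flat list of all bubble centers, then build the dict by slicing that list into chunks of four, one slice per question.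
import Mathlib
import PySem

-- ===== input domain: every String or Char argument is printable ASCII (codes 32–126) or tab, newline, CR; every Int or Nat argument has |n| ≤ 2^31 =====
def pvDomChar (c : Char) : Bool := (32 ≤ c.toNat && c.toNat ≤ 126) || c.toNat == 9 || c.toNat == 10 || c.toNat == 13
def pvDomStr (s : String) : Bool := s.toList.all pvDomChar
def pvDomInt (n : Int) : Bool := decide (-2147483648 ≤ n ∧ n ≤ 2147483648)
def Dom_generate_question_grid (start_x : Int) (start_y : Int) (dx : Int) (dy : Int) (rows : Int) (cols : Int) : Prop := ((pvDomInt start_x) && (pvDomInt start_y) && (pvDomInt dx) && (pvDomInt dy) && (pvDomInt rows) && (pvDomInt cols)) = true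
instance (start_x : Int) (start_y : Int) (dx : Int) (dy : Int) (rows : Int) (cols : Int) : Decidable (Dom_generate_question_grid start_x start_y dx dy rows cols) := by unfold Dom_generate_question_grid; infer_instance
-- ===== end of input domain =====

-- B (a different decomposition): a two-stage pipeline — materialize the flat list of bubble
-- centers, then build the dict by slicing it into chunks of four — replacing A's single pass
-- that mutates the dict per cell and bumps a q_num counter when a list reaches length 4.

-- ===== PORT A =====
def generate_question_grid (start_x : Int) (start_y : Int) (dx : Int) (dy : Int) (rows : Int) (cols : Int) : List (Int × List (Int × Int)) :=
  ((PySem.List.pyRange 0 rows 1).foldl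
    (fun (st : PySem.Dict Int (List (Int × Int)) × Int) r =>
      (PySem.List.pyRange 0 cols 1).foldl
        (fun st c =>
          let x := start_x + c * dx
          let y := start_y + r * dy
          let g := st.1.insert st.2 (st.1.getD st.2 [] ++ [(x, y)])
          if (g.getD st.2 []).length == 4 then (g, st.2 + 1) else (g, st.2))
        st)
    (PySem.Dict.empty, 1)).1.items

-- ===== PORT B =====
def generate_question_grid_alt (start_x : Int) (start_y : Int) (dx : Int) (dy : Int) (rows : Int) (cols : Int) : List (Int × List (Int × Int)) :=
  let centers := (PySem.List.pyRange 0 rows 1).flatMap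
    (fun r => (PySem.List.pyRange 0 cols 1).map
      (fun c => (start_x + c * dx, start_y + r * dy)))
  ((PySem.List.pyRange 0 (PySem.Int.floordiv ((centers.length : Int) + 3) 4) 1).foldl
    (fun (g : PySem.Dict Int (List (Int × Int))) q =>
      g.insert (q + 1) (PySem.List.slice centers (some (4 * q)) (some (4 * q + 4))))
    PySem.Dict.empty).items

-- ===== PRECONDITION & SPEC =====
def Spec_generate_question_grid (start_x : Int) (start_y : Int) (dx : Int) (dy : Int) (rows : Int) (cols : Int) (out : List (Int × List (Int × Int))) : Prop := out = generate_question_grid_alt start_x start_y dx dy rows cols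
instance (start_x : Int) (start_y : Int) (dx : Int) (dy : Int) (rows : Int) (cols : Int) (out : List (Int × List (Int × Int))) : Decidable (Spec_generate_question_grid start_x start_y dx dy rows cols out) := by unfold Spec_generate_question_grid; infer_instance

-- ===== CLAIM (what is proved, stated in full; the proofs are below) =====
def Claim_equal_generate_question_grid : Prop := ∀ (start_x : Int) (start_y : Int) (dx : Int) (dy : Int) (rows : Int) (cols : Int), Dom_generate_question_grid start_x start_y dx dy rows cols → Spec_generate_question_grid start_x start_y dx dy rows cols (generate_question_grid start_x start_y dx dy rows cols)

-- ===== LEMMAS AND PROOFS =====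

-- the flat row-major list of the first n bubble centers (grid width C)
def pvCenters (sx sy dx dy : Int) (C : Nat) (n : Nat) : List (Int × Int) :=
  (List.range n).map (fun i => (sx + ((i % C : Nat) : Int) * dx, sy + ((i / C : Nat) : Int) * dy))

lemma pvCenters_succ (sx sy dx dy : Int) (C : Nat) (n : Nat) :
    pvCenters sx sy dx dy C (n+1) =
    pvCenters sx sy dx dy C n ++
      [(sx + ((n % C : Nat) : Int) * dx, sy + ((n / C : Nat) : Int) * dy)] := by
  simp [pvCenters, List.range_succ]

-- the dictionary after k bubbles have been placed (A's loop state, question k/4+1 current)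
def pvG (sx sy dx dy : Int) (C : Nat) : Nat → PySem.Dict Int (List (Int × Int))
  | 0 => PySem.Dict.empty
  | k+1 =>
      let g := pvG sx sy dx dy C k
      g.insert (((k/4 : Nat) : Int) + 1)
        (g.getD (((k/4 : Nat) : Int) + 1) [] ++
          [(sx + ((k % C : Nat) : Int) * dx, sy + ((k / C : Nat) : Int) * dy)])

lemma pvG_get?_none (sx sy dx dy : Int) (C : Nat) (k : Nat) (j : Int)
    (hj : (((k+3)/4 : Nat) : Int) < j) : (pvG sx sy dx dy C k).get? j = none := by
  induction k with
  | zero => simp [pvG, PySem.Dict.get?_empty]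
  | succ k ih =>
      have h1 : (k+3)/4 ≤ (k+4)/4 := Nat.div_le_div_right (by omega)
      have h2 : k/4 + 1 = (k+4)/4 := by omega
      have hj' : (((k+3)/4 : Nat) : Int) < j := by
        have : ((((k+3)/4 : Nat)) : Int) ≤ (((k+1+3)/4 : Nat) : Int) := by exact_mod_cast h1
        omega
      have hne : j ≠ ((k/4 : Nat) : Int) + 1 := by
        have : (((k/4 + 1 : Nat)) : Int) ≤ (((k+1+3)/4 : Nat) : Int) := by
          exact_mod_cast (by omega : k/4 + 1 ≤ (k+4)/4)
        push_cast at this ⊢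
        omega
      rw [pvG]
      rw [PySem.Dict.get?_insert_of_ne _ _ hne]
      exact ih hj'

-- the items of A's loop state: questions 1..⌈k/4⌉, each holding its slice of the centers list
lemma pvG_items (sx sy dx dy : Int) (C : Nat) (k : Nat) :
    (pvG sx sy dx dy C k).items =
    (List.range ((k+3)/4)).map
      (fun q => (((q : Nat) : Int) + 1, ((pvCenters sx sy dx dy C k).drop (4*q)).take 4)) := by
  induction k with
  | zero => rfl
  | succ k ih =>
      have hcent := pvCenters_succ sx sy dx dy C k
      have hlen : (pvCenters sx sy dx dy C k).length = k := by
        simp [pvCenters]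
      -- chunks strictly before the last one are unchanged by appending the new center
      have hchunk : ∀ q : Nat, 4*q + 4 ≤ k →
          ((pvCenters sx sy dx dy C (k+1)).drop (4*q)).take 4 =
          ((pvCenters sx sy dx dy C k).drop (4*q)).take 4 := by
        intro q hq
        rw [hcent, List.drop_append_of_le_length (by omega), List.take_append_of_le_length]
        rw [List.length_drop, hlen]; omega
      by_cases h0 : k % 4 = 0
      · -- new question is opened: a fresh key is inserted at the end
        have hm : (k+3)/4 = k/4 := by omega
        have hm' : (k+1+3)/4 = k/4 + 1 := by omega
        have hfresh : (pvG sx sy dx dy C k).get? (((k/4 : Nat) : Int) + 1) = none := by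
          apply pvG_get?_none
          rw [hm]; push_cast; omega
        have hcontains : (pvG sx sy dx dy C k).contains (((k/4 : Nat) : Int) + 1) = false := by
          rw [PySem.Dict.contains_eq_isSome_get?, hfresh]; rfl
        rw [pvG]
        rw [PySem.Dict.items_insert_of_not_contains _ _ hcontains,
          PySem.Dict.getD_of_not_contains _ _ hcontains, ih, hm, hm', List.range_succ,
          List.map_append]
        congr 1
        · apply List.map_congr_left
          intro q hq
          rw [List.mem_range] at hq
          rw [hchunk q (by omega)]
        · -- the new chunk is exactly the new singleton
          simp only [List.map_cons, List.map_nil]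
          rw [hcent]
          have hdk : 4 * (k/4) = k := by omega
          rw [hdk, List.drop_append_of_le_length (by omega), List.drop_eq_nil_of_le (by omega)]
          simp
      · -- the current (last) question is extended in place
        have hm : (k+1+3)/4 = (k+3)/4 := by omega
        have hmval : (k+3)/4 = k/4 + 1 := by omega
        have hnodup : (pvG sx sy dx dy C k).keys.Nodup := by
          show ((pvG sx sy dx dy C k).items.map (·.1)).Nodup
          rw [ih, List.map_map]
          exact List.nodup_range.map (fun a b h => by
            simp only [Function.comp] at h; exact_mod_cast (by omega : ((a:Int)) + 1 = (b:Int) + 1 → (a:Int) = (b:Int)) h)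
        have hmem : ((((k/4 : Nat)) : Int) + 1,
            ((pvCenters sx sy dx dy C k).drop (4*(k/4))).take 4) ∈ (pvG sx sy dx dy C k).items := by
          rw [ih]
          have : k/4 ∈ List.range ((k+3)/4) := by rw [List.mem_range]; omega
          exact List.mem_map_of_mem this
        have hgetD : (pvG sx sy dx dy C k).getD (((k/4 : Nat) : Int) + 1) [] =
            ((pvCenters sx sy dx dy C k).drop (4*(k/4))).take 4 :=
          PySem.Dict.getD_of_mem_items _ hmem hnodup []
        have hcontains : (pvG sx sy dx dy C k).contains (((k/4 : Nat) : Int) + 1) = true := by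
          rw [PySem.Dict.contains_iff_mem_keys]
          exact PySem.Dict.mem_keys_of_mem_items _ hmem
        rw [pvG]
        rw [PySem.Dict.items_insert_of_contains _ _ hcontains, ih, hm, List.map_map]
        apply List.map_congr_left
        intro q hq
        rw [List.mem_range, hmval] at hq
        simp only [Function.comp]
        by_cases hql : q = k/4
        · subst hql
          rw [if_pos (by simp)]
          congr 1
          rw [hgetD, hcent]
          have hdlen : ((pvCenters sx sy dx dy C k).drop (4*(k/4))).length = k % 4 := by
            rw [List.length_drop, hlen]; omega
          rw [List.take_of_length_le (by omega : ((pvCenters sx sy dx dy C k).drop (4*(k/4))).length ≤ 4),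
            List.drop_append_of_le_length (by omega : 4*(k/4) ≤ (pvCenters sx sy dx dy C k).length),
            List.take_of_length_le (by simp [hdlen]; omega)]
        · rw [if_neg (by
            simp only [beq_iff_eq]
            intro h
            exact hql (by exact_mod_cast (by omega : ((q:Int)) + 1 = ((k/4 : Nat) : Int) + 1 → (q:Int) = ((k/4 : Nat) : Int)) h)),
            hchunk q (by omega)]

-- one inner-loop step of A, at row r, advances the state by one bubble
lemma pvG_len (sx sy dx dy : Int) (C : Nat) (k : Nat) :
    ((pvG sx sy dx dy C k).getD (((k/4 : Nat) : Int) + 1) []).length = k % 4 := by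
  induction k with
  | zero => simp [pvG, PySem.Dict.getD_empty]
  | succ k ih =>
      rw [pvG]
      by_cases h3 : k % 4 = 3
      · have hdiv : (k+1) / 4 = k / 4 + 1 := by omega
        have hmod : (k+1) % 4 = 0 := by omega
        have hne : (((k+1)/4 : Nat) : Int) + 1 ≠ ((k/4 : Nat) : Int) + 1 := by
          rw [hdiv]; push_cast; omega
        rw [PySem.Dict.getD_insert_of_ne]
        · rw [hmod, PySem.Dict.getD_eq_get?_getD,
            pvG_get?_none sx sy dx dy C k _ (by push_cast; omega)]
          rfl
        · exact hne
      · have hdiv : (k+1) / 4 = k / 4 := by omega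
        have hmod : (k+1) % 4 = k % 4 + 1 := by omega
        rw [hdiv, PySem.Dict.getD_insert_self, List.length_append, ih, hmod]
        rfl

lemma pvA_step (sx sy dx dy : Int) (C : Nat) (r s : Nat) (hs : s < C) :
    (let st : PySem.Dict Int (List (Int × Int)) × Int :=
        (pvG sx sy dx dy C (r*C+s), ((((r*C+s)/4 : Nat) : Int) + 1));
      let g := st.1.insert st.2 (st.1.getD st.2 [] ++ [(sx + (s : Int) * dx, sy + (r : Int) * dy)])
      if (g.getD st.2 []).length == 4 then (g, st.2 + 1) else (g, st.2)) =
    (pvG sx sy dx dy C (r*C+s+1), ((((r*C+s+1)/4 : Nat) : Int) + 1)) := by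
  have hmodC : (r*C+s) % C = s := by
    rw [Nat.add_comm, Nat.add_mul_mod_self_right, Nat.mod_eq_of_lt hs]
  have hdivC : (r*C+s) / C = r := by
    rw [Nat.add_comm, Nat.add_mul_div_right _ _ (by omega : 0 < C),
      Nat.div_eq_of_lt hs]
    omega
  have hg : (pvG sx sy dx dy C (r*C+s)).insert ((((r*C+s)/4 : Nat) : Int) + 1)
      ((pvG sx sy dx dy C (r*C+s)).getD ((((r*C+s)/4 : Nat) : Int) + 1) [] ++
        [(sx + (s : Int) * dx, sy + (r : Int) * dy)]) = pvG sx sy dx dy C (r*C+s+1) := by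
    rw [pvG]; rw [hmodC, hdivC]
  simp only [PySem.Dict.getD_insert_self, List.length_append, List.length_singleton,
    pvG_len]
  set k := r*C+s with hk
  by_cases h3 : k % 4 = 3
  · have hb : (k % 4 + 1 == 4) = true := by rw [h3]; rfl
    rw [hb, if_pos rfl, hg]
    have h4 : (k+1)/4 = k/4 + 1 := by omega
    rw [h4]; push_cast; ring_nf
  · have hb : (k % 4 + 1 == 4) = false := by
      simp only [beq_eq_false_iff_ne]; omega
    rw [hb, if_neg (by simp), hg]
    have h4 : (k+1)/4 = k/4 := by omega
    rw [h4]

-- A's inner loop over any consecutive block of columns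
lemma pvA_inner (sx sy dx dy : Int) (C : Nat) (r : Nat) :
    ∀ (len s : Nat), s + len ≤ C →
    ((List.range' s len).map (Nat.cast : Nat → Int)).foldl
      (fun (st : PySem.Dict Int (List (Int × Int)) × Int) c =>
        let x := sx + c * dx
        let y := sy + (r : Int) * dy
        let g := st.1.insert st.2 (st.1.getD st.2 [] ++ [(x, y)])
        if (g.getD st.2 []).length == 4 then (g, st.2 + 1) else (g, st.2))
      (pvG sx sy dx dy C (r*C+s), ((((r*C+s)/4 : Nat) : Int) + 1)) =
    (pvG sx sy dx dy C (r*C+s+len), ((((r*C+s+len)/4 : Nat) : Int) + 1)) := by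
  intro len
  induction len with
  | zero => intro s _; simp
  | succ len ih =>
      intro s hs
      rw [List.range'_succ, List.map_cons, List.foldl_cons]
      have hstep := pvA_step sx sy dx dy C r s (by omega)
      simp only at hstep
      rw [hstep]
      have := ih (s+1) (by omega)
      have harith : r*C+(s+1)+len = r*C+s+(len+1) := by omega
      rw [harith] at this
      exact this

-- A's outer loop
lemma pvA_outer (sx sy dx dy : Int) (C : Nat) :
    ∀ (R : Nat),
    ((List.range R).map (Nat.cast : Nat → Int)).foldl
      (fun (st : PySem.Dict Int (List (Int × Int)) × Int) r =>
        ((List.range C).map (Nat.cast : Nat → Int)).foldl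
          (fun st c =>
            let x := sx + c * dx
            let y := sy + r * dy
            let g := st.1.insert st.2 (st.1.getD st.2 [] ++ [(x, y)])
            if (g.getD st.2 []).length == 4 then (g, st.2 + 1) else (g, st.2))
          st)
      (PySem.Dict.empty, 1) =
    (pvG sx sy dx dy C (R*C), ((((R*C)/4 : Nat) : Int) + 1)) := by
  intro R
  induction R with
  | zero => simp [pvG]
  | succ R ih =>
      rw [List.range_succ, List.map_append, List.foldl_append, ih]
      simp only [List.map_cons, List.map_nil, List.foldl_cons, List.foldl_nil]
      have := pvA_inner sx sy dx dy C R C 0 (by omega)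
      rw [List.range_eq_range']
      simp only [Nat.add_zero] at this
      rw [this]
      have harith : R*C+C = (R+1)*C := by ring
      rw [harith]

-- B's flat comprehension builds exactly the centers list
lemma pvB_centers (sx sy dx dy : Int) (C : Nat) (hC : 0 < C) :
    ∀ (R : Nat),
    ((List.range R).map (Nat.cast : Nat → Int)).flatMap
      (fun r => ((List.range C).map (Nat.cast : Nat → Int)).map
        (fun c => (sx + c * dx, sy + r * dy))) =
    pvCenters sx sy dx dy C (R*C) := by
  intro R
  induction R with
  | zero => simp [pvCenters]
  | succ R ih =>
      rw [List.range_succ, List.map_append, List.flatMap_append, ih]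
      simp only [List.map_cons, List.map_nil, List.flatMap_cons, List.flatMap_nil,
        List.append_nil, List.map_map]
      have hblock : ∀ (len s : Nat), s + len ≤ C →
          pvCenters sx sy dx dy C (R*C+s+len) =
          pvCenters sx sy dx dy C (R*C+s) ++
            ((List.range' s len).map
              (fun c => (sx + ((c : Nat) : Int) * dx, sy + ((R : Nat) : Int) * dy))) := by
        intro len
        induction len with
        | zero => intro s _; simp
        | succ len ihl =>
            intro s hs
            have hmodC : (R*C+s) % C = s := by
              rw [Nat.add_comm, Nat.add_mul_mod_self_right, Nat.mod_eq_of_lt (by omega)]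
            have hdivC : (R*C+s) / C = R := by
              rw [Nat.add_comm, Nat.add_mul_div_right _ _ hC, Nat.div_eq_of_lt (by omega)]
              omega
            have h1 : pvCenters sx sy dx dy C (R*C+s+1) =
                pvCenters sx sy dx dy C (R*C+s) ++
                  [(sx + (s : Int) * dx, sy + (R : Int) * dy)] := by
              rw [pvCenters_succ, hmodC, hdivC]
            have h2 := ihl (s+1) (by omega)
            have harith : R*C+s+(len+1) = R*C+(s+1)+len := by omega
            rw [harith, h2, (by omega : R*C+(s+1) = R*C+s+1), h1,
              List.range'_succ, List.map_cons, List.append_assoc]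
            rfl
      have := hblock C 0 (by omega)
      simp only [Nat.add_zero] at this
      rw [(by ring : (R+1)*C = R*C+C), this, List.range_eq_range']
      rfl

-- B's dict-building loop over fresh increasing keys: its items are the chunk list
lemma pvB_fold (cs : List (Int × Int)) (m : Nat) :
    (((List.range m).map (Nat.cast : Nat → Int)).foldl
      (fun (g : PySem.Dict Int (List (Int × Int))) q =>
        g.insert (q + 1) (PySem.List.slice cs (some (4 * q)) (some (4 * q + 4))))
      PySem.Dict.empty).items =
    (List.range m).map
      (fun q => (((q : Nat) : Int) + 1, (cs.drop (4*q)).take 4)) := by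
  have h := PySem.Dict.items_foldl_insert_fresh
    (l := (List.range m).map (Nat.cast : Nat → Int))
    (k := fun q => q + 1)
    (v := fun q => PySem.List.slice cs (some (4 * q)) (some (4 * q + 4)))
    (d := PySem.Dict.empty)
    (by intro a _; exact PySem.Dict.contains_empty _)
    (by
      rw [List.map_map]
      exact List.nodup_range.map (fun a b hab => by
        simp only [Function.comp] at hab
        exact_mod_cast (by omega : ((a:Int)) + 1 = (b:Int) + 1 → (a:Int) = (b:Int)) hab))
  rw [h]
  simp only [PySem.Dict.empty, List.nil_append, List.map_map]
  apply List.map_congr_left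
  intro q _
  simp only [Function.comp]
  congr 1
  have h4q : (4 : Int) * (q : Nat) = ((4*q : Nat) : Int) := by push_cast; ring
  have h4q4 : (4 : Int) * (q : Nat) + 4 = ((4*q+4 : Nat) : Int) := by push_cast; ring
  rw [h4q4, h4q, PySem.List.slice_natCast]
  congr 1
  omega

-- degenerate case: a pyRange with a nonpositive stop is empty
lemma pyRange_nonpos (b : Int) (hb : b ≤ 0) : PySem.List.pyRange 0 b 1 = [] := by
  rw [PySem.List.pyRange_one]
  simp only [Int.sub_zero, List.map_eq_nil_iff, List.range_eq_nil]
  omega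

-- ===== VERDICT (by name: the statement is the Claim_ definition above) =====
theorem generate_question_grid_spec : Claim_equal_generate_question_grid := by
  unfold Claim_equal_generate_question_grid
  intro sx sy dx dy rows cols _
  unfold Spec_generate_question_grid generate_question_grid
  have hB : generate_question_grid_alt sx sy dx dy rows cols =
      ((PySem.List.pyRange 0 (PySem.Int.floordiv
          (((((PySem.List.pyRange 0 rows 1).flatMap
            (fun r => (PySem.List.pyRange 0 cols 1).map
              (fun c => (sx + c * dx, sy + r * dy)))).length : Int)) + 3) 4) 1).foldl
        (fun (g : PySem.Dict Int (List (Int × Int))) q =>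
          g.insert (q + 1) (PySem.List.slice
            ((PySem.List.pyRange 0 rows 1).flatMap
              (fun r => (PySem.List.pyRange 0 cols 1).map
                (fun c => (sx + c * dx, sy + r * dy))))
            (some (4 * q)) (some (4 * q + 4))))
        PySem.Dict.empty).items := rfl
  rw [hB]
  by_cases hr : rows ≤ 0
  · rw [pyRange_nonpos rows hr]
    simp only [List.flatMap_nil, List.length_nil, Nat.cast_zero, zero_add, List.foldl_nil]
    rw [(by decide : PySem.Int.floordiv (3 : Int) 4 = 0), pyRange_nonpos 0 (by omega)]
    rfl
  · by_cases hc : cols ≤ 0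
    · rw [pyRange_nonpos cols hc]
      have hid : ∀ (l : List Int) (st : PySem.Dict Int (List (Int × Int)) × Int),
          l.foldl (fun st _ => st) st = st := by
        intro l
        induction l with
        | nil => intro st; rfl
        | cons a l ih => intro st; exact ih st
      have hfm : ∀ (l : List Int),
          l.flatMap (fun _ => ([] : List (Int × Int))) = [] := by
        intro l
        induction l with
        | nil => rfl
        | cons a l ih => simp [ih]
      simp only [List.map_nil, List.foldl_nil]
      rw [hid, hfm]
      simp only [List.length_nil, Nat.cast_zero, zero_add]
      rw [(by decide : PySem.Int.floordiv (3 : Int) 4 = 0), pyRange_nonpos 0 (by omega)]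
      rfl
    · set R := rows.toNat with hR
      set C := cols.toNat with hCdef
      have hrows : rows = (R : Int) := (Int.toNat_of_nonneg (by omega)).symm
      have hcols : cols = (C : Int) := (Int.toNat_of_nonneg (by omega)).symm
      have hCpos : 0 < C := by omega
      rw [hrows, hcols, PySem.List.pyRange_zero_natCast, PySem.List.pyRange_zero_natCast]
      rw [pvA_outer sx sy dx dy C R, pvG_items sx sy dx dy C (R*C)]
      rw [pvB_centers sx sy dx dy C hCpos R]
      have hlen : (pvCenters sx sy dx dy C (R*C)).length = R*C := by
        simp [pvCenters]
      rw [hlen]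
      have hfd : PySem.Int.floordiv (((R*C : Nat) : Int) + 3) 4 = (((R*C+3)/4 : Nat) : Int) := by
        have : ((R*C : Nat) : Int) + 3 = ((R*C+3 : Nat) : Int) := by push_cast; ring
        rw [this]
        exact_mod_cast PySem.Int.floordiv_natCast (R*C+3) 4
      rw [hfd, PySem.List.pyRange_zero_natCast]
      rw [pvB_fold (pvCenters sx sy dx dy C (R*C)) ((R*C+3)/4)]
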